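-- pv_equiv track=rewrite | github.com/Son-OfAnton/Competitive-Programming | Contest/second_year_contests/contest_20/A_Se_7_en.py | solve
-- ===== SOURCE A (Python) =====
-- def solve(n):
--     sn = str(n)
--     size = len(sn)
--
--     if n % 7 == 0:
--         return n
--
--     for i in range(size):
--         for j in range(10):
--             if i == 0 and j == 0:
--                 continue
--
--             nn = int(sn[:i] + str(j) + sn[i+1:])
--             if nn % 7 == 0:
--                 return nn
-- ===== SOURCE B (Python) =====
-- def solve(n):
--     if n % 7 == 0:
--         return n
--     # Replace the first character of str(n) by the smallest digit (1-9) that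
--     # makes the resulting number divisible by 7, found by modular arithmetic
--     # instead of trying every candidate digit.
--     s = str(n)
--     tail = int(s[1:]) if len(s) > 1 else 0
--     p = pow(10, len(s) - 1, 7)
--     r = (-tail * pow(p, 5, 7)) % 7  # pow(p, 5, 7) = p^(-1) mod 7
--     return (r or 7) * 10 ** (len(s) - 1) + tail
-- ===== Notes on version B (the rewrite author's own statement) =====
-- stated objective: simpler
-- what changed: Replaces A's nested position x digit brute-force search (rebuilding and re-parsing a candidate string for every digit) by a direct computation: since some replacement of the first character always works, B parses the tail once and computes the smallest fitting leading digit with modular arithmetic (a modular inverse of the leading place value).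
import Mathlib
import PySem

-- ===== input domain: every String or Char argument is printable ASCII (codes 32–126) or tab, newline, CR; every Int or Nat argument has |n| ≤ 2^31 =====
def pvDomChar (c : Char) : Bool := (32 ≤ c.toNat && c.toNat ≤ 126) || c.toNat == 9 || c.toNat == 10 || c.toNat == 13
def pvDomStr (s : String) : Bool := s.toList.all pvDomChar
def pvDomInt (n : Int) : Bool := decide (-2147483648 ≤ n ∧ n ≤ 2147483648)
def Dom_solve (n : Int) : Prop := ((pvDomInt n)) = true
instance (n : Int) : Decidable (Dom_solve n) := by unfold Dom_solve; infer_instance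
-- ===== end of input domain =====

-- B replaces A's brute-force digit search (re-parsing a rebuilt string for every candidate digit)
-- by one parse of the tail and a direct modular-arithmetic computation of the smallest fitting
-- leading digit; equivalence is proved for every Int input.

-- ===== PORT A =====
-- inner loop 'for j in range(10)': returns none = Python raised, some none = fell through, some (some v) = returned v
def solveJ (sn : List Char) (i : Int) : List Int → Option (Option Int)
  | [] => some none
  | j :: js =>
    if i == 0 && j == 0 then solveJ sn i js
    else
      match PySem.Int.ofChars? (PySem.List.slice sn none (some i) ++ PySem.Int.toChars j ++ PySem.List.slice sn (some (i + 1)) none) with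
      | none => none
      | some nn => if PySem.Int.mod nn 7 == 0 then some (some nn) else solveJ sn i js

-- outer loop 'for i in range(size)'
def solveI (sn : List Char) : List Int → Option (Option Int)
  | [] => some none
  | i :: is =>
    match solveJ sn i (PySem.List.pyRange 0 10 1) with
    | none => none
    | some (some nn) => some (some nn)
    | some none => solveI sn is

def solve (n : Int) : Int :=
  let sn := PySem.Int.toChars n
  if PySem.Int.mod n 7 == 0 then n
  else
    match solveI sn (PySem.List.pyRange 0 (sn.length : Int) 1) with
    | some (some nn) => nn
    | _ => 0  -- unreachable for every Int input (position 0 always succeeds); Python would return None/raise here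

-- ===== PORT B =====
def solve_alt (n : Int) : Int :=
  if PySem.Int.mod n 7 == 0 then n
  else
    let s := PySem.Int.toChars n
    -- int(s[1:]): s[1:] is a digit string whenever len(s) > 1, so the parse always succeeds; getD 0 is unreachable
    let tail : Int :=
      if 1 < s.length then (PySem.Int.ofChars? (PySem.List.slice s (some 1) none)).getD 0 else 0
    let p := PySem.Int.powMod 10 (s.length - 1) 7
    let r := PySem.Int.mod (-tail * PySem.Int.powMod p 5 7) 7
    (if r == 0 then 7 else r) * 10 ^ (s.length - 1) + tail

-- ===== PRECONDITION & SPEC =====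
def Spec_solve (n : Int) (out : Int) : Prop := out = solve_alt n
instance (n : Int) (out : Int) : Decidable (Spec_solve n out) := by unfold Spec_solve; infer_instance

-- ===== CLAIM (what is proved, stated in full; the proofs are below) =====
def Claim_equal_solve : Prop := ∀ (n : Int), Dom_solve n → Spec_solve n (solve n)

-- ===== LEMMAS AND PROOFS =====

-- value of a digit string, Python-int-parser style (left fold with an accumulator)
def pvValAcc : List Char → Nat → Nat
  | [], acc => acc
  | c :: t, acc => pvValAcc t (acc * 10 + (c.toNat - '0'.toNat))

-- the low e digits of r, zero padded to width e (big endian)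
def pvPad : Nat → Nat → List Char
  | 0, _ => []
  | e + 1, r => pvPad e (r / 10) ++ [Nat.digitChar (r % 10)]

-- the body of PySem.Int.ofChars? with the recursive digit parser abstracted out
def pvShape (g : List Char → Bool → Nat → Option Nat) (s : List Char) : Option Int :=
  have cs := (List.dropWhile PySem.Int.isIntSpace (List.dropWhile PySem.Int.isIntSpace s).reverse).reverse
  match cs with
  | '-' :: ds => Option.map (fun n => -n) (do let a ← (match ds with | [] => none | cs' => g cs' false 0); pure ((a : Nat) : Int))
  | '+' :: ds => Option.map (fun n => n) (do let a ← (match ds with | [] => none | cs' => g cs' false 0); pure ((a : Nat) : Int))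
  | ds => Option.map (fun n => n) (do let a ← (match ds with | [] => none | cs' => g cs' false 0); pure ((a : Nat) : Int))

-- B's chosen digit, as computed from the residues only
def pvJ (p ρ : Int) : Int :=
  if (-ρ * (p ^ 5 % 7)) % 7 = 0 then 7 else (-ρ * (p ^ 5 % 7)) % 7

theorem pvDigitChar_isDigit (d : Nat) (h : d < 10) : (Nat.digitChar d).isDigit = true := by
  interval_cases d <;> decide

theorem pvDigitChar_val (d : Nat) (h : d < 10) : (Nat.digitChar d).toNat - '0'.toNat = d := by
  interval_cases d <;> decide

theorem pvDigit_not_space (c : Char) (h : c.isDigit = true) : PySem.Int.isIntSpace c = false := by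
  by_contra hs
  rw [Bool.not_eq_false] at hs
  simp only [PySem.Int.isIntSpace, Bool.or_eq_true, decide_eq_true_eq] at hs
  rcases hs with ((((hc | hc) | hc) | hc) | hc) | hc <;> subst hc <;> exact absurd h (by decide)

theorem pvDropWhile_all {α : Type} (p : α → Bool) (l : List α) (h : ∀ c ∈ l, p c = false) :
    List.dropWhile p l = l := by
  cases l with
  | nil => rfl
  | cons a t => simp [List.dropWhile, h a (List.mem_cons_self)]

theorem pvStrip_id (cs : List Char) (h : ∀ c ∈ cs, PySem.Int.isIntSpace c = false) :
    (List.dropWhile PySem.Int.isIntSpace (List.dropWhile PySem.Int.isIntSpace cs).reverse).reverse = cs := by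
  rw [pvDropWhile_all _ cs h,
      pvDropWhile_all _ cs.reverse (fun c hc => h c (List.mem_reverse.mp hc)),
      List.reverse_reverse]

-- run the abstracted digit parser over a pure digit list
theorem pvG_run (g : List Char → Bool → Nat → Option Nat)
    (hnil : ∀ b a, g [] b a = if b = true then some a else none)
    (hcons : ∀ c rest b a, g (c :: rest) b a =
      if c.isDigit = true then g rest true (a * 10 + (c.toNat - '0'.toNat))
      else if c = '_' ∧ b = true then
        (match rest with
         | d :: _ => if d.isDigit = true then g rest false a else none
         | [] => none)
      else none) :
    ∀ (t : List Char) (acc : Nat), (∀ c ∈ t, c.isDigit = true) → g t true acc = some (pvValAcc t acc) := by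
  intro t
  induction t with
  | nil => intro acc _; rw [hnil]; rfl
  | cons c t ih =>
    intro acc hd
    rw [hcons, if_pos (hd c (List.mem_cons_self))]
    exact ih _ (fun x hx => hd x (List.mem_cons_of_mem _ hx))

-- int(s) on a nonempty pure digit string
theorem pvParse_digits (cs : List Char) (h0 : cs ≠ []) (hd : ∀ c ∈ cs, c.isDigit = true) :
    PySem.Int.ofChars? cs = some ((pvValAcc cs 0 : Nat) : Int) := by
  obtain ⟨g, hof, hnil, hcons⟩ :
      ∃ g : List Char → Bool → Nat → Option Nat,
        (∀ s, PySem.Int.ofChars? s = pvShape g s) ∧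
        (∀ b a, g [] b a = if b = true then some a else none) ∧
        (∀ c rest b a, g (c :: rest) b a =
          if c.isDigit = true then g rest true (a * 10 + (c.toNat - '0'.toNat))
          else if c = '_' ∧ b = true then
            (match rest with
             | d :: _ => if d.isDigit = true then g rest false a else none
             | [] => none)
          else none) :=
    ⟨_, fun s => rfl, fun b a => rfl, fun c rest b a => rfl⟩
  rw [hof cs]
  simp only [pvShape, pvStrip_id cs (fun c hc => pvDigit_not_space c (hd c hc))]
  rcases cs with _ | ⟨c, t⟩
  · exact absurd rfl h0
  · have hc : c.isDigit = true := hd c (List.mem_cons_self)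
    have hcm : c ≠ '-' := by rintro rfl; exact absurd hc (by decide)
    have hcp : c ≠ '+' := by rintro rfl; exact absurd hc (by decide)
    split
    · rename_i ds heq; rw [List.cons.injEq] at heq; exact absurd heq.1 hcm
    · rename_i ds heq; rw [List.cons.injEq] at heq; exact absurd heq.1 hcp
    · show Option.map (fun n => n) ((g (c :: t) false 0).bind fun a => pure ((a : Nat) : Int)) = _
      rw [hcons, if_pos hc,
          pvG_run g hnil hcons t _ (fun x hx => hd x (List.mem_cons_of_mem _ hx))]
      rfl

theorem pvValAcc_append (xs : List Char) (c : Char) :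
    ∀ acc, pvValAcc (xs ++ [c]) acc = (pvValAcc xs acc) * 10 + (c.toNat - '0'.toNat) := by
  induction xs with
  | nil => intro acc; rfl
  | cons x xs ih => intro acc; simp only [List.cons_append, pvValAcc]; exact ih _

theorem pvPad_length : ∀ (e r : Nat), (pvPad e r).length = e := by
  intro e
  induction e with
  | zero => intro r; rfl
  | succ e ih => intro r; simp [pvPad, ih]

theorem pvPad_digits : ∀ (e r : Nat), ∀ c ∈ pvPad e r, c.isDigit = true := by
  intro e
  induction e with
  | zero => intro r c hc; simp [pvPad] at hc
  | succ e ih =>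
    intro r c hc
    simp only [pvPad, List.mem_append, List.mem_singleton] at hc
    rcases hc with hc | rfl
    · exact ih _ c hc
    · exact pvDigitChar_isDigit _ (Nat.mod_lt _ (by norm_num))

theorem pvValAcc_pad : ∀ (e r acc : Nat), r < 10 ^ e → pvValAcc (pvPad e r) acc = acc * 10 ^ e + r := by
  intro e
  induction e with
  | zero => intro r acc hr; simp [pvPad, pvValAcc]; omega
  | succ e ih =>
    intro r acc hr
    have hr' : r / 10 < 10 ^ e := by
      have : (10 : Nat) ^ (e + 1) = 10 ^ e * 10 := pow_succ 10 e
      omega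
    simp only [pvPad]
    rw [pvValAcc_append, ih (r / 10) acc hr', pvDigitChar_val _ (Nat.mod_lt _ (by norm_num))]
    have hp : (10 : Nat) ^ (e + 1) = 10 ^ e * 10 := pow_succ 10 e
    have hdm : 10 * (r / 10) + r % 10 = r := Nat.div_add_mod r 10
    set A := (10 : Nat) ^ e
    set B := acc * A
    rw [hp]
    ring_nf
    omega

theorem pvToDigits_decomp : ∀ (e d r : Nat), 0 < d → d < 10 → r < 10 ^ e →
    Nat.toDigits 10 (d * 10 ^ e + r) = Nat.digitChar d :: pvPad e r := by
  intro e
  induction e with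
  | zero =>
    intro d r hd0 hd hr
    have : r = 0 := by omega
    subst this
    rw [show d * 10 ^ 0 + 0 = d by ring]
    rw [Nat.toDigits_of_lt_base hd]
    rfl
  | succ e ih =>
    intro d r hd0 hd hr
    have hp : (10 : Nat) ^ (e + 1) = 10 ^ e * 10 := pow_succ 10 e
    have hN : 10 ≤ d * 10 ^ (e + 1) + r := by
      have h1 : (10 : Nat) ≤ 10 ^ (e + 1) := by
        calc (10 : Nat) = 10 ^ 1 := (pow_one 10).symm
        _ ≤ 10 ^ (e + 1) := Nat.pow_le_pow_right (by norm_num) (by omega)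
      nlinarith
    rw [Nat.toDigits_of_base_le (by norm_num) hN]
    have hdiv : (d * 10 ^ (e + 1) + r) / 10 = d * 10 ^ e + r / 10 := by
      set A := (10 : Nat) ^ e
      set B := d * A
      rw [hp, show d * (A * 10) = B * 10 by ring]
      omega
    have hmod : (d * 10 ^ (e + 1) + r) % 10 = r % 10 := by
      set A := (10 : Nat) ^ e
      set B := d * A
      rw [hp, show d * (A * 10) = B * 10 by ring]
      omega
    have hr' : r / 10 < 10 ^ e := by omega
    rw [hdiv, hmod, ih d (r / 10) hd0 hd hr']
    rfl

theorem pvValAcc_toDigits : ∀ (m : Nat), ∀ acc, pvValAcc (Nat.toDigits 10 m) acc = acc * 10 ^ (Nat.toDigits 10 m).length + m := by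
  intro m
  induction m using Nat.strong_induction_on with
  | _ m ih =>
    intro acc
    by_cases hm : m < 10
    · rw [Nat.toDigits_of_lt_base hm]
      simp only [pvValAcc, List.length_cons, List.length_nil]
      have := pvDigitChar_val m hm
      have h48 : '0'.toNat ≤ (Nat.digitChar m).toNat := by interval_cases m <;> decide
      omega
    · rw [Nat.toDigits_of_base_le (by norm_num) (by omega)]
      rw [pvValAcc_append, ih (m / 10) (by omega) acc]
      have hdc : (Nat.digitChar (m % 10)).toNat - '0'.toNat = m % 10 :=
        pvDigitChar_val _ (Nat.mod_lt _ (by norm_num))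
      rw [hdc]
      simp only [List.length_append, List.length_cons, List.length_nil]
      set L := (Nat.toDigits 10 (m / 10)).length
      have hpw : (10 : Nat) ^ (L + 1) = 10 ^ L * 10 := pow_succ 10 L
      set A := (10 : Nat) ^ L
      set B := acc * A
      rw [show L + (0 + 1) = L + 1 by ring, hpw, show acc * (A * 10) = B * 10 by ring]
      omega

theorem pvJ_bounds (p ρ : Int) : 1 ≤ pvJ p ρ ∧ pvJ p ρ ≤ 7 := by
  unfold pvJ
  have h1 : 0 ≤ (-ρ * (p ^ 5 % 7)) % 7 := Int.emod_nonneg _ (by norm_num)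
  have h2 : (-ρ * (p ^ 5 % 7)) % 7 < 7 := Int.emod_lt_of_pos _ (by norm_num)
  split_ifs <;> omega

theorem pvJ_hits (p ρ : Int) (hp1 : 1 ≤ p) (hp7 : p < 7) (hρ1 : 0 ≤ ρ) (hρ7 : ρ < 7) :
    (pvJ p ρ * p + ρ) % 7 = 0 := by
  interval_cases p <;> interval_cases ρ <;> decide

theorem pvJ_min (p ρ : Int) (hp1 : 1 ≤ p) (hp7 : p < 7) (hρ1 : 0 ≤ ρ) (hρ7 : ρ < 7) :
    ∀ k : Int, 1 ≤ k → k < pvJ p ρ → (k * p + ρ) % 7 ≠ 0 := by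
  intro k hk1 hk2
  have hb := pvJ_bounds p ρ
  have hk7 : k < 7 := by omega
  interval_cases p <;> interval_cases ρ <;> interval_cases k <;> revert hk2 <;> decide

-- not 7 ∣ 10^e
theorem pvTen_pow_mod (e : Nat) : 1 ≤ (10 : Int) ^ e % 7 ∧ (10 : Int) ^ e % 7 < 7 := by
  have h2 : (10 : Int) ^ e % 7 < 7 := Int.emod_lt_of_pos _ (by norm_num)
  have h0 : 0 ≤ (10 : Int) ^ e % 7 := Int.emod_nonneg _ (by norm_num)
  have hne : (10 : Int) ^ e % 7 ≠ 0 := by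
    intro h
    have hdvd : (7 : Int) ∣ 10 ^ e := Int.dvd_of_emod_eq_zero h
    have : (7 : Nat) ∣ 10 ^ e := by exact_mod_cast hdvd
    have : (7 : Nat) ∣ 10 := Nat.Prime.dvd_of_dvd_pow (by norm_num) this
    omega
  omega

-- step lemmas for A's inner loop at i = 0
theorem pvJ_skip (sn : List Char) (js : List Int) : solveJ sn 0 (0 :: js) = solveJ sn 0 js := by
  simp [solveJ]

theorem pvJ_fail (sn : List Char) (js : List Int) (j v : Int) (hj : j ≠ 0)
    (hp : PySem.Int.ofChars? (PySem.List.slice sn none (some 0) ++ PySem.Int.toChars j ++ PySem.List.slice sn (some (0 + 1)) none) = some v)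
    (hv : ¬ PySem.Int.mod v 7 = 0) :
    solveJ sn 0 (j :: js) = solveJ sn 0 js := by
  rw [solveJ, if_neg (by simp [hj]), hp]
  simp only []
  rw [if_neg (by simpa using hv)]

theorem pvJ_succ (sn : List Char) (js : List Int) (j v : Int) (hj : j ≠ 0)
    (hp : PySem.Int.ofChars? (PySem.List.slice sn none (some 0) ++ PySem.Int.toChars j ++ PySem.List.slice sn (some (0 + 1)) none) = some v)
    (hv : PySem.Int.mod v 7 = 0) :
    solveJ sn 0 (j :: js) = some (some v) := by
  rw [solveJ, if_neg (by simp [hj]), hp]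
  simp only []
  rw [if_pos (by simpa using hv)]

-- A's inner loop at position 0 over a digit tail t returns exactly pvJ's value
theorem pvLoop_at_zero (c0 : Char) (t : List Char) (e r : Nat)
    (ht : ∀ c ∈ t, c.isDigit = true)
    (_hlen : t.length = e)
    (hval : ∀ acc, pvValAcc t acc = acc * 10 ^ e + r) :
    solveJ (c0 :: t) 0 (PySem.List.pyRange 0 10 1) =
      some (some (pvJ ((10 : Int) ^ e % 7) ((r : Int) % 7) * 10 ^ e + (r : Int))) := by
  set p := (10 : Int) ^ e % 7 with hpdef
  set ρ := (r : Int) % 7 with hρdef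
  have hpb := pvTen_pow_mod e
  have hρb : 0 ≤ ρ ∧ ρ < 7 :=
    ⟨Int.emod_nonneg _ (by norm_num), Int.emod_lt_of_pos _ (by norm_num)⟩
  -- parsing the candidate built at i = 0 with digit k
  have hparse : ∀ k : Nat, 1 ≤ k → k < 10 →
      PySem.Int.ofChars? (PySem.List.slice (c0 :: t) none (some 0) ++ PySem.Int.toChars (k : Int) ++ PySem.List.slice (c0 :: t) (some (0 + 1)) none)
        = some ((k * 10 ^ e + r : Nat) : Int) := by
    intro k hk1 hk2
    have hs1 : PySem.List.slice (c0 :: t) none (some (0 : Int)) = [] := by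
      simp [pysem]
    have hs2 : PySem.List.slice (c0 :: t) (some ((0 : Int) + 1)) none = t := by
      norm_num; simp [pysem]
    have htc : PySem.Int.toChars (k : Int) = [Nat.digitChar k] := by
      interval_cases k <;> decide
    rw [hs1, hs2, htc, List.nil_append, List.singleton_append]
    rw [pvParse_digits (Nat.digitChar k :: t) (by simp)
        (by intro c hc
            rcases List.mem_cons.mp hc with rfl | hc
            · exact pvDigitChar_isDigit k (by omega)
            · exact ht c hc)]
    congr 1
    show ((pvValAcc t (0 * 10 + ((Nat.digitChar k).toNat - '0'.toNat)) : Nat) : Int) = _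
    rw [pvDigitChar_val k (by omega)]
    rw [show 0 * 10 + k = k by ring, hval k]
  -- the divisibility test, in residue form
  have hcond : ∀ k : Nat, (PySem.Int.mod ((k * 10 ^ e + r : Nat) : Int) 7 = 0) ↔ (((k : Int) * p + ρ) % 7 = 0) := by
    intro k
    rw [PySem.Int.mod_eq_emod_of_pos (by norm_num)]
    have hcast : ((k * 10 ^ e + r : Nat) : Int) = (k : Int) * (10 : Int) ^ e + (r : Int) := by push_cast; ring
    rw [hcast]
    have heq : ((k : Int) * (10 : Int) ^ e + (r : Int)) % 7 = ((k : Int) * p + ρ) % 7 := by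
      conv_lhs => rw [Int.add_emod, Int.mul_emod]
      conv_rhs => rw [Int.add_emod, Int.mul_emod]
      have e1 : p % 7 = (10 : Int) ^ e % 7 := by rw [hpdef]; exact Int.emod_emod_of_dvd _ dvd_rfl
      have e2 : ρ % 7 = (r : Int) % 7 := by rw [hρdef]; exact Int.emod_emod_of_dvd _ dvd_rfl
      rw [e1, e2]
    rw [heq]
  set J := pvJ p ρ with hJdef
  have hJb := pvJ_bounds p ρ
  have hJhit := pvJ_hits p ρ hpb.1 hpb.2 hρb.1 hρb.2
  have hJmin := pvJ_min p ρ hpb.1 hpb.2 hρb.1 hρb.2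
  have hrange : PySem.List.pyRange 0 10 1 = [0, 1, 2, 3, 4, 5, 6, 7, 8, 9] := by decide
  rw [hrange]
  have hsucc : ∀ k : Nat, 1 ≤ k → k < 10 → (k : Int) = J →
      PySem.Int.mod ((k * 10 ^ e + r : Nat) : Int) 7 = 0 := by
    intro k hk1 hk2 hkJ
    rw [hcond k, hkJ]; exact hJhit
  have hfails : ∀ k : Nat, 1 ≤ k → k < 10 → (k : Int) < J →
      ¬ PySem.Int.mod ((k * 10 ^ e + r : Nat) : Int) 7 = 0 := by
    intro k hk1 hk2 hkJ
    rw [hcond k]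
    exact hJmin (k : Int) (by exact_mod_cast hk1) hkJ
  -- the result value, as A casts it
  have hres : ∀ k : Nat, (k : Int) = J → ((k * 10 ^ e + r : Nat) : Int) = J * 10 ^ e + (r : Int) := by
    intro k hkJ; push_cast; rw [hkJ]
  -- J ∈ {1,...,7}: walk the loop
  have hJ7 : J = 1 ∨ J = 2 ∨ J = 3 ∨ J = 4 ∨ J = 5 ∨ J = 6 ∨ J = 7 := by omega
  rcases hJ7 with hJv | hJv | hJv | hJv | hJv | hJv | hJv
  · rw [pvJ_skip]
    rw [pvJ_succ _ _ _ _ (by norm_num)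
        (by exact_mod_cast hparse 1 (by norm_num) (by norm_num))
        (by exact_mod_cast hsucc 1 (by norm_num) (by norm_num) (by rw [hJv]; norm_num))]
    rw [hres 1 (by rw [hJv]; norm_num)]
  · rw [pvJ_skip]
    rw [pvJ_fail _ _ _ _ (by norm_num)
        (by exact_mod_cast hparse 1 (by norm_num) (by norm_num))
        (by exact_mod_cast hfails 1 (by norm_num) (by norm_num) (by rw [hJv]; norm_num))]
    rw [pvJ_succ _ _ _ _ (by norm_num)
        (by exact_mod_cast hparse 2 (by norm_num) (by norm_num))
        (by exact_mod_cast hsucc 2 (by norm_num) (by norm_num) (by rw [hJv]; norm_num))]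
    rw [hres 2 (by rw [hJv]; norm_num)]
  · rw [pvJ_skip]
    rw [pvJ_fail _ _ _ _ (by norm_num)
        (by exact_mod_cast hparse 1 (by norm_num) (by norm_num))
        (by exact_mod_cast hfails 1 (by norm_num) (by norm_num) (by rw [hJv]; norm_num))]
    rw [pvJ_fail _ _ _ _ (by norm_num)
        (by exact_mod_cast hparse 2 (by norm_num) (by norm_num))
        (by exact_mod_cast hfails 2 (by norm_num) (by norm_num) (by rw [hJv]; norm_num))]
    rw [pvJ_succ _ _ _ _ (by norm_num)
        (by exact_mod_cast hparse 3 (by norm_num) (by norm_num))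
        (by exact_mod_cast hsucc 3 (by norm_num) (by norm_num) (by rw [hJv]; norm_num))]
    rw [hres 3 (by rw [hJv]; norm_num)]
  · rw [pvJ_skip]
    rw [pvJ_fail _ _ _ _ (by norm_num)
        (by exact_mod_cast hparse 1 (by norm_num) (by norm_num))
        (by exact_mod_cast hfails 1 (by norm_num) (by norm_num) (by rw [hJv]; norm_num))]
    rw [pvJ_fail _ _ _ _ (by norm_num)
        (by exact_mod_cast hparse 2 (by norm_num) (by norm_num))
        (by exact_mod_cast hfails 2 (by norm_num) (by norm_num) (by rw [hJv]; norm_num))]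
    rw [pvJ_fail _ _ _ _ (by norm_num)
        (by exact_mod_cast hparse 3 (by norm_num) (by norm_num))
        (by exact_mod_cast hfails 3 (by norm_num) (by norm_num) (by rw [hJv]; norm_num))]
    rw [pvJ_succ _ _ _ _ (by norm_num)
        (by exact_mod_cast hparse 4 (by norm_num) (by norm_num))
        (by exact_mod_cast hsucc 4 (by norm_num) (by norm_num) (by rw [hJv]; norm_num))]
    rw [hres 4 (by rw [hJv]; norm_num)]
  · rw [pvJ_skip]
    rw [pvJ_fail _ _ _ _ (by norm_num)
        (by exact_mod_cast hparse 1 (by norm_num) (by norm_num))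
        (by exact_mod_cast hfails 1 (by norm_num) (by norm_num) (by rw [hJv]; norm_num))]
    rw [pvJ_fail _ _ _ _ (by norm_num)
        (by exact_mod_cast hparse 2 (by norm_num) (by norm_num))
        (by exact_mod_cast hfails 2 (by norm_num) (by norm_num) (by rw [hJv]; norm_num))]
    rw [pvJ_fail _ _ _ _ (by norm_num)
        (by exact_mod_cast hparse 3 (by norm_num) (by norm_num))
        (by exact_mod_cast hfails 3 (by norm_num) (by norm_num) (by rw [hJv]; norm_num))]
    rw [pvJ_fail _ _ _ _ (by norm_num)
        (by exact_mod_cast hparse 4 (by norm_num) (by norm_num))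
        (by exact_mod_cast hfails 4 (by norm_num) (by norm_num) (by rw [hJv]; norm_num))]
    rw [pvJ_succ _ _ _ _ (by norm_num)
        (by exact_mod_cast hparse 5 (by norm_num) (by norm_num))
        (by exact_mod_cast hsucc 5 (by norm_num) (by norm_num) (by rw [hJv]; norm_num))]
    rw [hres 5 (by rw [hJv]; norm_num)]
  · rw [pvJ_skip]
    rw [pvJ_fail _ _ _ _ (by norm_num)
        (by exact_mod_cast hparse 1 (by norm_num) (by norm_num))
        (by exact_mod_cast hfails 1 (by norm_num) (by norm_num) (by rw [hJv]; norm_num))]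
    rw [pvJ_fail _ _ _ _ (by norm_num)
        (by exact_mod_cast hparse 2 (by norm_num) (by norm_num))
        (by exact_mod_cast hfails 2 (by norm_num) (by norm_num) (by rw [hJv]; norm_num))]
    rw [pvJ_fail _ _ _ _ (by norm_num)
        (by exact_mod_cast hparse 3 (by norm_num) (by norm_num))
        (by exact_mod_cast hfails 3 (by norm_num) (by norm_num) (by rw [hJv]; norm_num))]
    rw [pvJ_fail _ _ _ _ (by norm_num)
        (by exact_mod_cast hparse 4 (by norm_num) (by norm_num))
        (by exact_mod_cast hfails 4 (by norm_num) (by norm_num) (by rw [hJv]; norm_num))]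
    rw [pvJ_fail _ _ _ _ (by norm_num)
        (by exact_mod_cast hparse 5 (by norm_num) (by norm_num))
        (by exact_mod_cast hfails 5 (by norm_num) (by norm_num) (by rw [hJv]; norm_num))]
    rw [pvJ_succ _ _ _ _ (by norm_num)
        (by exact_mod_cast hparse 6 (by norm_num) (by norm_num))
        (by exact_mod_cast hsucc 6 (by norm_num) (by norm_num) (by rw [hJv]; norm_num))]
    rw [hres 6 (by rw [hJv]; norm_num)]
  · rw [pvJ_skip]
    rw [pvJ_fail _ _ _ _ (by norm_num)
        (by exact_mod_cast hparse 1 (by norm_num) (by norm_num))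
        (by exact_mod_cast hfails 1 (by norm_num) (by norm_num) (by rw [hJv]; norm_num))]
    rw [pvJ_fail _ _ _ _ (by norm_num)
        (by exact_mod_cast hparse 2 (by norm_num) (by norm_num))
        (by exact_mod_cast hfails 2 (by norm_num) (by norm_num) (by rw [hJv]; norm_num))]
    rw [pvJ_fail _ _ _ _ (by norm_num)
        (by exact_mod_cast hparse 3 (by norm_num) (by norm_num))
        (by exact_mod_cast hfails 3 (by norm_num) (by norm_num) (by rw [hJv]; norm_num))]
    rw [pvJ_fail _ _ _ _ (by norm_num)
        (by exact_mod_cast hparse 4 (by norm_num) (by norm_num))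
        (by exact_mod_cast hfails 4 (by norm_num) (by norm_num) (by rw [hJv]; norm_num))]
    rw [pvJ_fail _ _ _ _ (by norm_num)
        (by exact_mod_cast hparse 5 (by norm_num) (by norm_num))
        (by exact_mod_cast hfails 5 (by norm_num) (by norm_num) (by rw [hJv]; norm_num))]
    rw [pvJ_fail _ _ _ _ (by norm_num)
        (by exact_mod_cast hparse 6 (by norm_num) (by norm_num))
        (by exact_mod_cast hfails 6 (by norm_num) (by norm_num) (by rw [hJv]; norm_num))]
    rw [pvJ_succ _ _ _ _ (by norm_num)
        (by exact_mod_cast hparse 7 (by norm_num) (by norm_num))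
        (by exact_mod_cast hsucc 7 (by norm_num) (by norm_num) (by rw [hJv]; norm_num))]
    rw [hres 7 (by rw [hJv]; norm_num)]

-- assemble A's side: from the loop result to what 'solve' returns
theorem pvSolve_eval (n : Int) (h7 : ¬ PySem.Int.mod n 7 = 0)
    (c0 : Char) (t : List Char) (hsn : PySem.Int.toChars n = c0 :: t) (v : Int)
    (hJ : solveJ (c0 :: t) 0 (PySem.List.pyRange 0 10 1) = some (some v)) :
    solve n = v := by
  show (if PySem.Int.mod n 7 == 0 then n
    else
      match solveI (PySem.Int.toChars n) (PySem.List.pyRange 0 ((PySem.Int.toChars n).length : Int) 1) with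
      | some (some nn) => nn
      | _ => 0) = v
  rw [if_neg (by simpa using h7), hsn]
  have hlen : (0 : Int) < ((c0 :: t).length : Int) := by
    simp only [List.length_cons]; positivity
  rw [PySem.List.pyRange_one_cons hlen]
  show (match solveI (c0 :: t) (0 :: PySem.List.pyRange (0 + 1) ((c0 :: t).length : Int) 1) with
      | some (some nn) => nn
      | _ => 0) = v
  simp only [solveI, hJ]

-- B's result in pvJ form: str(n) = c0 :: t with a pure digit tail of value r
theorem pvAlt_eval (n : Int) (h7 : ¬ PySem.Int.mod n 7 = 0)
    (c0 : Char) (t : List Char) (hsn : PySem.Int.toChars n = c0 :: t) (r : Nat)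
    (ht : ∀ c ∈ t, c.isDigit = true)
    (hval : pvValAcc t 0 = r)
    (hnilr : t = [] → r = 0) :
    solve_alt n = pvJ ((10 : Int) ^ t.length % 7) ((r : Int) % 7) * 10 ^ t.length + (r : Int) := by
  show (if PySem.Int.mod n 7 == 0 then n
    else
      let s := PySem.Int.toChars n
      let tail : Int :=
        if 1 < s.length then (PySem.Int.ofChars? (PySem.List.slice s (some 1) none)).getD 0 else 0
      let p := PySem.Int.powMod 10 (s.length - 1) 7
      let r := PySem.Int.mod (-tail * PySem.Int.powMod p 5 7) 7
      (if r == 0 then 7 else r) * 10 ^ (s.length - 1) + tail) = _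
  rw [if_neg (by simpa using h7)]
  simp only [hsn, List.length_cons, Nat.add_sub_cancel]
  have htail : (if 1 < t.length + 1 then (PySem.Int.ofChars? (PySem.List.slice (c0 :: t) (some 1) none)).getD 0 else (0 : Int)) = (r : Int) := by
    cases t with
    | nil => simp [hnilr rfl]
    | cons d ds =>
      rw [if_pos (by simp)]
      rw [PySem.List.slice_from_one]
      show (PySem.Int.ofChars? (d :: ds)).getD 0 = (r : Int)
      rw [pvParse_digits (d :: ds) (by simp) ht, hval]
      rfl
  rw [htail]
  rw [PySem.Int.powMod_eq_emod 10 t.length (by norm_num),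
      PySem.Int.powMod_eq_emod _ 5 (by norm_num),
      PySem.Int.mod_eq_emod_of_pos (by norm_num : (0:Int) < 7)]
  unfold pvJ
  have hmul : (-(r : Int) * (((10 : Int) ^ t.length % 7) ^ 5 % 7)) % 7
      = (-((r : Int) % 7) * (((10 : Int) ^ t.length % 7) ^ 5 % 7)) % 7 := by
    conv_lhs => rw [Int.mul_emod]
    conv_rhs => rw [Int.mul_emod]
    have : (-(r : Int)) % 7 = (-((r : Int) % 7)) % 7 := by omega
    rw [this]
  rw [hmul]
  split_ifs with h1 h2 h2
  · rfl
  · simp only [beq_iff_eq] at h1; exact absurd h1 h2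
  · simp only [beq_iff_eq] at h1; exact absurd h2 h1
  · rfl

-- ===== VERDICT (by name: the statement is the Claim_ definition above) =====
theorem solve_spec : Claim_equal_solve := by
  unfold Claim_equal_solve
  intro n _
  unfold Spec_solve
  by_cases h7 : PySem.Int.mod n 7 = 0
  · show solve n = solve_alt n
    show (if PySem.Int.mod n 7 == 0 then n else _) = (if PySem.Int.mod n 7 == 0 then n else _)
    rw [if_pos (by simpa using h7), if_pos (by simpa using h7)]
  · show solve n = solve_alt n
    by_cases hneg : n < 0
    · -- negative n: the first character of str(n) is '-', the tail is all |n|'s digits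
      set m : Nat := (-n).toNat with hm
      have hmn : (m : Int) = -n := by omega
      have hm0 : 0 < m := by omega
      set t := Nat.toDigits 10 m with htdef
      have hsn : PySem.Int.toChars n = '-' :: t := by
        unfold PySem.Int.toChars
        rw [if_pos hneg]
        have : n.natAbs = m := by omega
        rw [this]
      have hA : solve n = pvJ ((10 : Int) ^ t.length % 7) ((m : Int) % 7) * 10 ^ t.length + (m : Int) := by
        refine pvSolve_eval n h7 '-' t hsn _ ?_
        exact pvLoop_at_zero '-' t t.length m
          (fun c hc => Nat.isDigit_of_mem_toDigits (by norm_num) (by norm_num) hc)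
          rfl
          (fun acc => pvValAcc_toDigits m acc)
      have hB : solve_alt n = pvJ ((10 : Int) ^ t.length % 7) ((m : Int) % 7) * 10 ^ t.length + (m : Int) := by
        refine pvAlt_eval n h7 '-' t hsn m
          (fun c hc => Nat.isDigit_of_mem_toDigits (by norm_num) (by norm_num) hc)
          ?_ ?_
        · have := pvValAcc_toDigits m 0
          simpa using this
        · intro hnil
          exfalso
          have := Nat.length_toDigits_pos (b := 10) (n := m)
          rw [← htdef, hnil] at this
          simp at this
      rw [hA, hB]
    · -- nonnegative n (n = 0 is excluded by h7): leading digit d, tail of the digits kept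
      rw [not_lt] at hneg
      have hn0 : 0 < n := by
        rcases lt_or_eq_of_le hneg with h | h
        · exact h
        · exfalso; apply h7; rw [← h]; rfl
      set m : Nat := n.toNat with hm
      have hmn : (m : Int) = n := by omega
      have hm0 : 0 < m := by omega
      set e := Nat.log 10 m with hedef
      have hlb : 10 ^ e ≤ m := Nat.pow_log_le_self 10 (by omega)
      have hub : m < 10 ^ (e + 1) := Nat.lt_pow_succ_log_self (by norm_num) m
      set d := m / 10 ^ e with hddef
      set r := m % 10 ^ e with hrdef
      have hd1 : 1 ≤ d := (Nat.le_div_iff_mul_le (Nat.pow_pos (by norm_num))).mpr (by omega)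
      have hd10 : d < 10 := by
        rw [hddef, Nat.div_lt_iff_lt_mul (Nat.pow_pos (by norm_num))]
        have hp : (10 : Nat) ^ (e + 1) = 10 ^ e * 10 := pow_succ 10 e
        omega
      have hr : r < 10 ^ e := Nat.mod_lt _ (Nat.pow_pos (by norm_num))
      have hmdr : d * 10 ^ e + r = m := by
        rw [hddef, hrdef]; rw [Nat.mul_comm]; exact Nat.div_add_mod m (10 ^ e)
      have hsn : PySem.Int.toChars n = Nat.digitChar d :: pvPad e r := by
        unfold PySem.Int.toChars
        rw [if_neg (by omega)]
        have : n.toNat = m := rfl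
        rw [this, ← hmdr]
        exact pvToDigits_decomp e d r (by omega) hd10 hr
      have hlen : (pvPad e r).length = e := pvPad_length e r
      have hA : solve n = pvJ ((10 : Int) ^ e % 7) ((r : Int) % 7) * 10 ^ e + (r : Int) := by
        refine pvSolve_eval n h7 (Nat.digitChar d) (pvPad e r) hsn _ ?_
        exact pvLoop_at_zero (Nat.digitChar d) (pvPad e r) e r
          (pvPad_digits e r) hlen
          (fun acc => pvValAcc_pad e r acc hr)
      have hB : solve_alt n = pvJ ((10 : Int) ^ e % 7) ((r : Int) % 7) * 10 ^ e + (r : Int) := by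
        have := pvAlt_eval n h7 (Nat.digitChar d) (pvPad e r) hsn r
          (pvPad_digits e r)
          (by rw [pvValAcc_pad e r 0 hr]; ring)
          (by intro hnil
              have : e = 0 := by rw [← hlen, hnil]; rfl
              rw [hrdef, this] at *
              omega)
        rw [hlen] at this
        exact this
      rw [hA, hB]
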